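-- pv_equiv track=rewrite | github.com/ahmadkhatib02/Grid-BasedPath-Planning-and-Shape-Formation-Simulator | Simple_MARL_Integration.py | _sort_by_difficulty
-- ===== SOURCE A (Python) =====
-- def _sort_by_difficulty(agent_positions, target_positions, grid_state):
--     """
--     Sort agent and target positions by difficulty.
--     The most difficult target gets the first agent, and so on.
--
--     Args:
--         agent_positions: List of (row, col) tuples representing agent positions
--         target_positions: List of (row, col) tuples representing target positions
--         grid_state: Dictionary of cell states
--
--     Returns:
--         Tuple of (sorted_agent_positions, sorted_target_positions)
--     """
--     if not agent_positions or not target_positions: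
--         return agent_positions, target_positions
--
--     # Calculate difficulty for each target position
--     target_difficulties = []
--
--     for target in target_positions:
--         # Factors that contribute to difficulty:
--         # 1. Distance from the center of the grid
--         # 2. Number of obstacles nearby
--         # 3. Number of other targets nearby
--
--         # Calculate grid center
--         grid_size = max(max(row for row, _ in grid_state.keys()),
--                         max(col for _, col in grid_state.keys())) + 1
--         center_row, center_col = grid_size // 2, grid_size // 2
--
--         # Calculate distance from center
--         distance_from_center = abs(target[0] - center_row) + abs(target[1] - center_col)
--
--         # Count obstacles nearby
--         obstacles_nearby = 0
--         for dr in range(-2, 3):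
--             for dc in range(-2, 3):
--                 neighbor = (target[0] + dr, target[1] + dc)
--                 if neighbor in grid_state and grid_state[neighbor].get("obstacle", False):
--                     obstacles_nearby += 1
--
--         # Count other targets nearby
--         targets_nearby = 0
--         for other_target in target_positions:
--             if other_target != target:
--                 distance = abs(target[0] - other_target[0]) + abs(target[1] - other_target[1])
--                 if distance <= 2:
--                     targets_nearby += 1
--
--         # Calculate total difficulty score
--         difficulty = distance_from_center + obstacles_nearby * 2 + targets_nearby
--         target_difficulties.append((target, difficulty))
--
--     # Sort targets by difficulty (highest first)
--     target_difficulties.sort(key=lambda x: x[1], reverse=True)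
--     sorted_targets = [t[0] for t in target_difficulties]
--
--     # Sort agents by their distance to the first target
--     agent_distances = []
--     first_target = sorted_targets[0]
--
--     for agent in agent_positions:
--         distance = abs(agent[0] - first_target[0]) + abs(agent[1] - first_target[1])
--         agent_distances.append((agent, distance))
--
--     # Sort agents by distance (closest first)
--     agent_distances.sort(key=lambda x: x[1])
--     sorted_agents = [a[0] for a in agent_distances]
--
--     return sorted_agents, sorted_targets
-- ===== SOURCE B (Python) =====
-- # B: hoists the grid-size scan out of the per-target loop and replaces the
-- # O(T^2) nearby-target scan with a position->count hash probed on the 13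
-- # offsets at Manhattan distance <= 2; sorts with key functions directly.
-- _DIAMOND = [(-2, 0), (-1, -1), (-1, 0), (-1, 1), (0, -2), (0, -1), (0, 0),
--             (0, 1), (0, 2), (1, -1), (1, 0), (1, 1), (2, 0)]
--
--
-- def _sort_by_difficulty(agent_positions, target_positions, grid_state):
--     if not agent_positions or not target_positions:
--         return agent_positions, target_positions
--
--     grid_size = max(max(r for r, _ in grid_state.keys()),
--                     max(c for _, c in grid_state.keys())) + 1
--     center = grid_size // 2
--
--     counts = {}
--     for t in target_positions:
--         counts[t] = counts.get(t, 0) + 1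
--
--     def difficulty(t):
--         dist = abs(t[0] - center) + abs(t[1] - center)
--         obstacles = 0
--         for dr in range(-2, 3):
--             for dc in range(-2, 3):
--                 cell = grid_state.get((t[0] + dr, t[1] + dc))
--                 if cell is not None and cell.get("obstacle", False):
--                     obstacles += 1
--         nearby = sum(counts.get((t[0] + dr, t[1] + dc), 0)
--                      for dr, dc in _DIAMOND) - counts[t]
--         return dist + obstacles * 2 + nearby
--
--     sorted_targets = sorted(target_positions, key=difficulty, reverse=True)
--     first = sorted_targets[0]
--     sorted_agents = sorted(agent_positions,
--                            key=lambda a: abs(a[0] - first[0]) + abs(a[1] - first[1]))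
--     return sorted_agents, sorted_targets
-- ===== Notes on version B (the rewrite author's own statement) =====
-- stated objective: faster
-- what changed: B hoists the loop-invariant grid-size max scan out of the per-target loop and replaces the O(T^2) pairwise nearby-target scan with a position->count dict probed at the 13 offsets of Manhattan distance <= 2, using sorted(key=...) directly instead of decorate-sort-undecorate.
import Mathlib
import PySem

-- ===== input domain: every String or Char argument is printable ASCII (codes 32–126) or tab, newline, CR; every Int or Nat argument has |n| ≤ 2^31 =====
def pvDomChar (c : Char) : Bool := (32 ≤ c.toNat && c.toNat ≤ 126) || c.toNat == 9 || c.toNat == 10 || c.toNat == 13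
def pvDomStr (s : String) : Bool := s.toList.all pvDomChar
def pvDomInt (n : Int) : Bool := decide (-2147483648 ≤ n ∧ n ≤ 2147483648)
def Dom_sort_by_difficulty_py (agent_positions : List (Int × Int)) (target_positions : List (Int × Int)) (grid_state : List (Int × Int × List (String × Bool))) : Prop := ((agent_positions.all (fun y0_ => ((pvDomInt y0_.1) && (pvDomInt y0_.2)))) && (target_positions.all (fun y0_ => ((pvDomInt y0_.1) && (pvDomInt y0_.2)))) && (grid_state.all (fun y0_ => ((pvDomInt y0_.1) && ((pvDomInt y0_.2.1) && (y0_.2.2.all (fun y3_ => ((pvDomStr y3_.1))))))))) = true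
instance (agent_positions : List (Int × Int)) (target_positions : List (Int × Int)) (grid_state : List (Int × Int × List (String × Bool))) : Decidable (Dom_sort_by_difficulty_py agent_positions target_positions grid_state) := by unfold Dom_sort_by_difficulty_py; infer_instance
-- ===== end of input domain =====

-- B hoists the loop-invariant grid-size scan out of the per-target loop and replaces the
-- O(T^2) nearby-target scan by a position→count hash probed at the 13 offsets of Manhattan
-- distance ≤ 2 (objective: faster, O(G + T·log T) vs O(T·G + T²)); return value only.

-- ===== PORT A =====
def sort_by_difficulty_py (agent_positions : List (Int × Int)) (target_positions : List (Int × Int)) (grid_state : List (Int × Int × List (String × Bool))) : (List (Int × Int)) × (List (Int × Int)) :=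
  if agent_positions = [] ∨ target_positions = [] then (agent_positions, target_positions) else
  let gsD : PySem.Dict (Int × Int) (List (String × Bool)) :=
    PySem.Dict.mk (grid_state.map (fun e => ((e.1, e.2.1), e.2.2)))
  let target_difficulties : List ((Int × Int) × Int) := target_positions.foldl (fun acc target =>
    -- grid_size recomputed on every iteration, as in A
    match PySem.List.max? (grid_state.map (·.1)) (fun y => y),
          PySem.List.max? (grid_state.map (·.2.1)) (fun y => y) with
    | some mr, some mc =>
      let grid_size : Int := max mr mc + 1
      let center : Int := PySem.Int.floordiv grid_size 2
      let distance_from_center : Int := |target.1 - center| + |target.2 - center|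
      let obstacles_nearby : Int := (PySem.List.pyRange (-2) 3 1).foldl (fun ob dr =>
        (PySem.List.pyRange (-2) 3 1).foldl (fun ob2 dc =>
          match gsD.get? (target.1 + dr, target.2 + dc) with
          | some cell => if (PySem.Dict.mk cell).getD "obstacle" false then ob2 + 1 else ob2
          | none => ob2) ob) 0
      let targets_nearby : Int := target_positions.foldl (fun n other =>
        if other ≠ target then
          (if |target.1 - other.1| + |target.2 - other.2| ≤ 2 then n + 1 else n)
        else n) 0
      acc ++ [(target, distance_from_center + obstacles_nearby * 2 + targets_nearby)]
    | _, _ => acc) []     -- none is unreachable under Pre_ (grid_state ≠ []): Python raises ValueError there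
  let sorted_targets := (PySem.List.sorted target_difficulties (fun p => p.2) true).map (fun p => p.1)
  match sorted_targets with
  | [] => (agent_positions, target_positions)   -- unreachable under Pre_: Python raises on sorted_targets[0]
  | first_target :: _ =>
    let agent_distances : List ((Int × Int) × Int) := agent_positions.foldl (fun acc a =>
      acc ++ [(a, |a.1 - first_target.1| + |a.2 - first_target.2|)]) []
    ((PySem.List.sorted agent_distances (fun p => p.2) false).map (fun p => p.1), sorted_targets)

-- ===== PORT B =====
-- the 13 offsets at Manhattan distance ≤ 2 (Source B's _DIAMOND)
def pvDiamond : List (Int × Int) :=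
  [(-2, 0), (-1, -1), (-1, 0), (-1, 1), (0, -2), (0, -1), (0, 0), (0, 1), (0, 2), (1, -1), (1, 0), (1, 1), (2, 0)]

def sort_by_difficulty_py_alt (agent_positions : List (Int × Int)) (target_positions : List (Int × Int)) (grid_state : List (Int × Int × List (String × Bool))) : (List (Int × Int)) × (List (Int × Int)) :=
  if agent_positions = [] ∨ target_positions = [] then (agent_positions, target_positions) else
  let gsD : PySem.Dict (Int × Int) (List (String × Bool)) :=
    PySem.Dict.mk (grid_state.map (fun e => ((e.1, e.2.1), e.2.2)))
  match PySem.List.max? (grid_state.map (·.1)) (fun y => y) with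
  | none => (agent_positions, target_positions)   -- unreachable under Pre_: Python raises ValueError there
  | some mr =>
    match PySem.List.max? (grid_state.map (·.2.1)) (fun y => y) with
    | none => (agent_positions, target_positions)
    | some mc =>
      let center : Int := PySem.Int.floordiv (max mr mc + 1) 2
      let counts : PySem.Dict (Int × Int) Int :=
        target_positions.foldl (fun d t => d.insert t (d.getD t 0 + 1)) PySem.Dict.empty
      let difficulty : (Int × Int) → Int := fun t =>
        let dist : Int := |t.1 - center| + |t.2 - center|
        let obstacles : Int := (PySem.List.pyRange (-2) 3 1).foldl (fun ob dr =>
          (PySem.List.pyRange (-2) 3 1).foldl (fun ob2 dc =>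
            match gsD.get? (t.1 + dr, t.2 + dc) with
            | some cell => if (PySem.Dict.mk cell).getD "obstacle" false then ob2 + 1 else ob2
            | none => ob2) ob) 0
        let nearby : Int := (pvDiamond.map (fun d => counts.getD (t.1 + d.1, t.2 + d.2) 0)).sum - counts.getD t 0
        dist + obstacles * 2 + nearby
      let sorted_targets := PySem.List.sorted target_positions difficulty true
      match sorted_targets.head? with
      | none => (agent_positions, target_positions)   -- unreachable: target_positions ≠ []
      | some first =>
        (PySem.List.sorted agent_positions (fun a => |a.1 - first.1| + |a.2 - first.2|) false, sorted_targets)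

-- ===== PRECONDITION & SPEC =====
-- Pre_ excludes only inputs where both Pythons raise ValueError: nonempty agents and targets with an empty grid_state
def Pre_sort_by_difficulty_py (agent_positions : List (Int × Int)) (target_positions : List (Int × Int)) (grid_state : List (Int × Int × List (String × Bool))) : Prop :=
  agent_positions = [] ∨ target_positions = [] ∨ grid_state ≠ []
instance (agent_positions : List (Int × Int)) (target_positions : List (Int × Int)) (grid_state : List (Int × Int × List (String × Bool))) : Decidable (Pre_sort_by_difficulty_py agent_positions target_positions grid_state) := by unfold Pre_sort_by_difficulty_py; infer_instance

def pvWitness_sort_by_difficulty_py : (List (Int × Int)) × (List (Int × Int)) × (List (Int × Int × List (String × Bool))) :=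
  ([(0, 0), (2, 1)], [(1, 1), (0, 2)], [(0, 0, [("obstacle", true)]), (2, 2, [("obstacle", false)])])

def Spec_sort_by_difficulty_py (agent_positions : List (Int × Int)) (target_positions : List (Int × Int)) (grid_state : List (Int × Int × List (String × Bool))) (out : (List (Int × Int)) × (List (Int × Int))) : Prop := out = sort_by_difficulty_py_alt agent_positions target_positions grid_state
instance (agent_positions : List (Int × Int)) (target_positions : List (Int × Int)) (grid_state : List (Int × Int × List (String × Bool))) (out : (List (Int × Int)) × (List (Int × Int))) : Decidable (Spec_sort_by_difficulty_py agent_positions target_positions grid_state out) := by unfold Spec_sort_by_difficulty_py; infer_instance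

-- ===== CLAIM (what is proved, stated in full; the proofs are below) =====
def Claim_equal_sort_by_difficulty_py : Prop := ∀ (agent_positions : List (Int × Int)) (target_positions : List (Int × Int)) (grid_state : List (Int × Int × List (String × Bool))), Dom_sort_by_difficulty_py agent_positions target_positions grid_state → Pre_sort_by_difficulty_py agent_positions target_positions grid_state → Spec_sort_by_difficulty_py agent_positions target_positions grid_state (sort_by_difficulty_py agent_positions target_positions grid_state)

-- ===== LEMMAS AND PROOFS =====

-- the two ports read the head of the sorted target list through different match shapes
lemma pv_bridge_head (L : List (Int × Int)) (d : (List (Int × Int)) × (List (Int × Int)))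
    (f : (Int × Int) → (List (Int × Int)) × (List (Int × Int))) :
    (match L with | [] => d | a :: _ => f a)
    = (match L.head? with | none => d | some a => f a) := by
  cases L <;> rfl

lemma pvDiamond_indicator (t u : Int × Int) :
    (pvDiamond.map (fun d => if (t.1 + d.1, t.2 + d.2) = u then (1 : Int) else 0)).sum
    = if |t.1 - u.1| + |t.2 - u.2| ≤ 2 then (1 : Int) else 0 := by
  obtain ⟨t1, t2⟩ := t
  obtain ⟨u1, u2⟩ := u
  obtain ⟨a, rfl⟩ : ∃ a, u1 = t1 + a := ⟨u1 - t1, by ring⟩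
  obtain ⟨b, rfl⟩ : ∃ b, u2 = t2 + b := ⟨u2 - t2, by ring⟩
  simp only [pvDiamond, List.map, List.sum_cons, List.sum_nil, Prod.mk.injEq,
    add_right_inj, add_zero]
  have h1 : t1 - (t1 + a) = -a := by ring
  have h2 : t2 - (t2 + b) = -b := by ring
  rw [h1, h2, abs_neg, abs_neg]
  by_cases h : |a| + |b| ≤ 2
  · rw [if_pos h]
    simp only [Int.abs_eq_natAbs] at h
    have ha : -2 ≤ a ∧ a ≤ 2 := by omega
    have hbb : -2 ≤ b ∧ b ≤ 2 := by omega
    obtain ⟨ha1, ha2⟩ := ha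
    obtain ⟨hb1, hb2⟩ := hbb
    interval_cases a <;> interval_cases b <;> simp_all
  · rw [if_neg h]
    simp only [Int.abs_eq_natAbs] at h
    have z : ∀ (c c' : Int), c.natAbs + c'.natAbs ≤ 2 → (if c = a ∧ c' = b then (1:Int) else 0) = 0 := by
      intro c c' hcc
      rw [if_neg]
      rintro ⟨rfl, rfl⟩
      omega
    rw [z (-2) 0 (by decide), z (-1) (-1) (by decide), z (-1) 0 (by decide), z (-1) 1 (by decide),
       z 0 (-2) (by decide), z 0 (-1) (by decide), z 0 0 (by decide), z 0 1 (by decide), z 0 2 (by decide),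
       z 1 (-1) (by decide), z 1 0 (by decide), z 1 1 (by decide), z 2 0 (by decide)]
    norm_num

lemma pvSum_counts (tps : List (Int × Int)) (t : Int × Int) :
    (pvDiamond.map (fun d => ((List.count (t.1 + d.1, t.2 + d.2) tps : Nat) : Int))).sum
    = (tps.countP (fun u => decide (|t.1 - u.1| + |t.2 - u.2| ≤ 2)) : Int) := by
  induction tps with
  | nil => simp [pvDiamond]
  | cons u xs ih =>
    have hcc : ∀ d : Int × Int, ((List.count (t.1 + d.1, t.2 + d.2) (u :: xs) : Nat) : Int)
        = ((List.count (t.1 + d.1, t.2 + d.2) xs : Nat) : Int)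
          + (if (t.1 + d.1, t.2 + d.2) = u then (1 : Int) else 0) := by
      intro d
      rw [List.count_cons]
      by_cases h : (t.1 + d.1, t.2 + d.2) = u
      · simp [h]
      · have : (u == (t.1 + d.1, t.2 + d.2)) = false := by
          simp; exact fun e => h e.symm
        simp [this, h]
    calc (pvDiamond.map (fun d => ((List.count (t.1 + d.1, t.2 + d.2) (u :: xs) : Nat) : Int))).sum
        = (pvDiamond.map (fun d => ((List.count (t.1 + d.1, t.2 + d.2) xs : Nat) : Int)
            + (if (t.1 + d.1, t.2 + d.2) = u then (1 : Int) else 0))).sum := by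
          exact congrArg List.sum (List.map_congr_left (fun d _ => hcc d))
      _ = (pvDiamond.map (fun d => ((List.count (t.1 + d.1, t.2 + d.2) xs : Nat) : Int))).sum
            + (pvDiamond.map (fun d => (if (t.1 + d.1, t.2 + d.2) = u then (1 : Int) else 0))).sum := by
          rw [← List.sum_map_add]
      _ = ((u :: xs).countP (fun v => decide (|t.1 - v.1| + |t.2 - v.2| ≤ 2)) : Int) := by
          rw [ih, pvDiamond_indicator, List.countP_cons]
          by_cases h : |t.1 - u.1| + |t.2 - u.2| ≤ 2 <;> simp [h]

lemma pv_nearby_eq (tps : List (Int × Int)) (t : Int × Int) :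
    ∀ n : Int, tps.foldl (fun n other =>
        if other ≠ t then
          (if |t.1 - other.1| + |t.2 - other.2| ≤ 2 then n + 1 else n)
        else n) n
    = n + (pvDiamond.map (fun d => ((List.count (t.1 + d.1, t.2 + d.2) tps : Nat) : Int))).sum
        - (List.count t tps : Int) := by
  induction tps with
  | nil => intro n; simp [pvDiamond]
  | cons u xs ih =>
    intro n
    rw [List.foldl_cons, ih, pvSum_counts, pvSum_counts, List.countP_cons, List.count_cons]
    by_cases hu : u = t
    · subst hu
      have h2 : |u.1 - u.1| + |u.2 - u.2| ≤ 2 := by simp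
      simp
      omega
    · by_cases h2 : |t.1 - u.1| + |t.2 - u.2| ≤ 2
      · simp [hu, h2]
        ring
      · simp [hu, h2]

lemma pv_insertBy_decor {α : Type} (f : α → Int) (cmp : Int → Int → Bool) (x : α) (acc : List α) :
    PySem.List.insertBy (fun a b => cmp a.2 b.2) (x, f x) (acc.map (fun y => (y, f y)))
    = (PySem.List.insertBy (fun a b => cmp (f a) (f b)) x acc).map (fun y => (y, f y)) := by
  induction acc with
  | nil => simp [PySem.List.insertBy]
  | cons y ys ih =>
    simp only [List.map_cons, PySem.List.insertBy]
    by_cases hc : cmp (f x) (f y) = true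
    · simp [hc]
    · simp only [Bool.not_eq_true] at hc
      simp [hc, ih]

lemma pv_foldl_insertBy_decor {α : Type} (f : α → Int) (cmp : Int → Int → Bool) (xs acc : List α) :
    (xs.map (fun y => (y, f y))).foldl
        (fun acc p => PySem.List.insertBy (fun a b => cmp a.2 b.2) p acc) (acc.map (fun y => (y, f y)))
    = (xs.foldl (fun acc x => PySem.List.insertBy (fun a b => cmp (f a) (f b)) x acc) acc).map
        (fun y => (y, f y)) := by
  induction xs generalizing acc with
  | nil => simp
  | cons x xs ih =>
    simp only [List.map_cons, List.foldl_cons, pv_insertBy_decor]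
    rw [← ih]

lemma pv_sorted_decor {α : Type} (xs : List α) (f : α → Int) (rev : Bool) :
    (PySem.List.sorted (xs.map (fun y => (y, f y))) (fun p => p.2) rev).map (fun p => p.1)
    = PySem.List.sorted xs f rev := by
  cases rev
  · rw [PySem.List.sorted_eq_foldl_insertBy, PySem.List.sorted_eq_foldl_insertBy]
    have := pv_foldl_insertBy_decor f (fun a b => decide (a < b)) xs []
    simp only [List.map_nil] at this
    rw [this, List.map_map]
    exact List.map_id'' (fun x => rfl) _
  · rw [PySem.List.sorted_rev_eq_foldl_insertBy, PySem.List.sorted_rev_eq_foldl_insertBy]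
    have := pv_foldl_insertBy_decor f (fun a b => decide (b < a)) xs []
    simp only [List.map_nil] at this
    rw [this, List.map_map]
    exact List.map_id'' (fun x => rfl) _

-- ===== VERDICT (by name: the statement is the Claim_ definition above) =====
theorem sort_by_difficulty_py_spec : Claim_equal_sort_by_difficulty_py := by
  intro aps tps gs hdom hpre
  unfold Spec_sort_by_difficulty_py
  by_cases he : aps = [] ∨ tps = []
  · simp [sort_by_difficulty_py, sort_by_difficulty_py_alt, he]
  · have hgs : gs ≠ [] := by
      rcases hpre with h | h | h
      · exact absurd (Or.inl h) he
      · exact absurd (Or.inr h) he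
      · exact h
    obtain ⟨e, gs', rfl⟩ := List.exists_cons_of_ne_nil hgs
    simp only [sort_by_difficulty_py, sort_by_difficulty_py_alt, if_neg he,
      List.map_cons, PySem.List.max?_id_cons,
      PySem.List.foldl_append_singleton_eq_map, List.nil_append,
      PySem.Dict.foldl_insert_getD_add_one_eq_counter, PySem.Dict.getD_counter,
      pv_nearby_eq, zero_add, pv_sorted_decor]
    rw [pv_bridge_head]
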